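-- pv_equiv track=rewrite | github.com/redmajor/EPIJudge | epi_judge_python/buy_and_sell_stock_twice.py | solve_from_start
-- ===== SOURCE A (Python) =====
-- def solve_from_start(prices):
--     lowest = prices[0]
--     profits = [0]
--     best_profit = 0
--
--     for price in prices:
--         lowest = min(lowest, price)
--         best_profit = max(best_profit, price - lowest)
--         profits.append(best_profit)
--
--     return profits
-- ===== SOURCE B (Python) =====
-- def solve_from_start(prices):
--     # Best single buy-sell profit within one prefix, computed right-to-left:
--     # scan backwards keeping the highest later sell price, and take the best
--     # margin highest - price over all buy positions.
--     def best_profit(prefix):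
--         best = 0
--         highest = None
--         for price in reversed(prefix):
--             highest = price if highest is None else max(highest, price)
--             best = max(best, highest - price)
--         return best
--
--     return [best_profit(prices[:k]) for k in range(len(prices) + 1)]
-- ===== Notes on version B (the rewrite author's own statement) =====
-- stated objective: alternative
-- what changed: B abandons A's forward single scan with shared running-minimum/best state and instead computes each prefix answer independently by the dual recurrence: a backward scan of the prefix maintaining the maximum later sell price; Pre_ excludes the empty list, on which A raises IndexError (prices[0]).
import Mathlib
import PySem

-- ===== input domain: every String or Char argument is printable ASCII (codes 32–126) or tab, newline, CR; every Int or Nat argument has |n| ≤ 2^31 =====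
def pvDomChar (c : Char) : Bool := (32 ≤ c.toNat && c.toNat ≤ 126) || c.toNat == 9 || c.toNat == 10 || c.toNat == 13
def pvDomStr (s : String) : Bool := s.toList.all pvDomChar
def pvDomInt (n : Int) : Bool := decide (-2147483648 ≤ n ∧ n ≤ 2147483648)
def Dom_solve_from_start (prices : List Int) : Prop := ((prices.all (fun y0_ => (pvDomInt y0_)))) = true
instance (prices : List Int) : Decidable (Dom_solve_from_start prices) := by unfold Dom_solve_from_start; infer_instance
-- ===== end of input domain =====

-- B recomputes each prefix's answer independently by a backward suffix-max scan,
-- instead of A's forward scan with shared running-minimum/best state (alternative algorithm).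

-- ===== PORT A =====
-- A: one forward loop carrying (lowest, best_profit, profits).
def solve_from_start (prices : List Int) : List Int :=
  match PySem.List.pyGet? prices 0 with
  | none => []  -- Python raises IndexError here; excluded by Pre_
  | some l0 =>
    (prices.foldl
      (fun (st : Int × Int × List Int) price =>
        let lowest := min st.1 price
        let best_profit := max st.2.1 (price - lowest)
        (lowest, best_profit, st.2.2 ++ [best_profit]))
      (l0, 0, [0])).2.2

-- ===== PORT B =====
-- best profit inside one prefix: backward scan keeping the highest later sell price.
def best_profit (prefix_ : List Int) : Int :=
  (prefix_.reverse.foldl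
    (fun (st : Int × Option Int) price =>
      let highest := match st.2 with | none => price | some h => max h price
      (max st.1 (highest - price), some highest))
    (0, none)).1

def solve_from_start_alt (prices : List Int) : List Int :=
  (PySem.List.pyRange 0 (prices.length + 1) 1).map
    (fun k => best_profit (PySem.List.slice prices none (some k)))

-- ===== PRECONDITION & SPEC =====
-- Pre_ excludes only the empty list, on which the Python A raises IndexError (prices[0]).
def Pre_solve_from_start (prices : List Int) : Prop := prices ≠ []
instance (prices : List Int) : Decidable (Pre_solve_from_start prices) := by unfold Pre_solve_from_start; infer_instance
def pvWitness_solve_from_start : List Int := [3, 1, 4, 1, 5]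

def Spec_solve_from_start (prices : List Int) (out : List Int) : Prop := out = solve_from_start_alt prices
instance (prices : List Int) (out : List Int) : Decidable (Spec_solve_from_start prices out) := by unfold Spec_solve_from_start; infer_instance

-- ===== CLAIM (what is proved, stated in full; the proofs are below) =====
def Claim_equal_solve_from_start : Prop := ∀ (prices : List Int), Dom_solve_from_start prices → Pre_solve_from_start prices → Spec_solve_from_start prices (solve_from_start prices)

-- ===== LEMMAS AND PROOFS =====

-- max / min of a nonempty list a :: l, as A and B fold them
def pvMaxA (a : Int) (l : List Int) : Int := l.foldl max a
def pvMinA (a : Int) (l : List Int) : Int := l.foldl min a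

-- the best buy/sell profit of a list, by its left recursion (B's recurrence)
def pvP : List Int → Int
  | [] => 0
  | x :: t => max (pvP t) (pvMaxA x t - x)

theorem pvMaxA_comm (l : List Int) : ∀ a b : Int, pvMaxA (max a b) l = max (pvMaxA a l) b := by
  induction l with
  | nil => intro a b; simp [pvMaxA]
  | cons x t ih =>
    intro a b
    simp only [pvMaxA, List.foldl] at *
    rw [max_right_comm a b x, ih]

theorem pvMinA_comm (l : List Int) : ∀ a b : Int, pvMinA (min a b) l = min (pvMinA a l) b := by
  induction l with
  | nil => intro a b; simp [pvMinA]
  | cons x t ih =>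
    intro a b
    simp only [pvMinA, List.foldl] at *
    rw [min_right_comm a b x, ih]

-- the optional "highest so far" carried by B's backward scan
def pvHi : List Int → Option Int
  | [] => none
  | x :: t => some (pvMaxA x t)

-- characterization of B's backward fold
theorem best_profit_fold (l : List Int) :
    (l.reverse.foldl
      (fun (st : Int × Option Int) price =>
        let highest := match st.2 with | none => price | some h => max h price
        (max st.1 (highest - price), some highest))
      (0, none)) = (pvP l, pvHi l) := by
  induction l with
  | nil => rfl
  | cons x t ih =>
    simp only [List.reverse_cons, List.foldl_append, ih]
    cases t with
    | nil => simp [pvP, pvHi, pvMaxA, List.foldl]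
    | cons y t' =>
      have hm : pvMaxA x (y :: t') = max (pvMaxA y t') x := by
        show pvMaxA (max x y) t' = _
        rw [max_comm x y, pvMaxA_comm]
      simp only [pvHi, pvP, List.foldl, hm]

theorem best_profit_eq (l : List Int) : best_profit l = pvP l := by
  unfold best_profit
  rw [best_profit_fold]

-- snoc recurrence for pvP (A's recurrence)
theorem pvP_snoc (l : List Int) : ∀ p : Int, pvP (l ++ [p]) = max (pvP l) (p - pvMinA p l) := by
  induction l with
  | nil => intro p; simp [pvP, pvMaxA, pvMinA, List.foldl]
  | cons y t ih =>
    intro p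
    have hM : pvMaxA y (t ++ [p]) = max (pvMaxA y t) p := by
      simp [pvMaxA, List.foldl_append]
    have hm : pvMinA p (y :: t) = min (pvMinA p t) y := by
      show pvMinA (min p y) t = _
      rw [pvMinA_comm]
    simp only [List.cons_append, pvP, ih, hM, hm]
    omega

-- A's loop characterization
theorem A_char (s : List Int) : ∀ (h : Int) (t out : List Int),
    (s.foldl
      (fun (st : Int × Int × List Int) price =>
        let lowest := min st.1 price
        let best_profit := max st.2.1 (price - lowest)
        (lowest, best_profit, st.2.2 ++ [best_profit]))
      (pvMinA h t, pvP (h :: t), out)).2.2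
    = out ++ (List.range s.length).map (fun j => pvP ((h :: t) ++ s.take (j + 1))) := by
  induction s with
  | nil => intro h t out; simp
  | cons p s' ih =>
    intro h t out
    have hlow : min (pvMinA h t) p = pvMinA h (t ++ [p]) := by
      simp [pvMinA, List.foldl_append]
    have hmin : pvMinA p (h :: t) = min (pvMinA h t) p := by
      show pvMinA (min p h) t = _
      rw [min_comm p h, pvMinA_comm]
    have hbest : max (pvP (h :: t)) (p - min (pvMinA h t) p) = pvP (h :: (t ++ [p])) := by
      have := pvP_snoc (h :: t) p
      rw [hmin] at this
      simpa using this.symm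
    simp only [List.foldl]
    rw [hbest, hlow]
    rw [ih h (t ++ [p])]
    simp only [List.length_cons, List.range_succ_eq_map, List.map_cons, List.map_map]
    simp [Function.comp, List.append_assoc]

-- ===== VERDICT (by name: the statement is the Claim_ definition above) =====
theorem solve_from_start_spec : Claim_equal_solve_from_start := by
  intro prices _ hpre
  unfold Spec_solve_from_start
  match prices, hpre with
  | p :: ps, _ =>
    show solve_from_start (p :: ps) = solve_from_start_alt (p :: ps)
    -- A side
    have hA : solve_from_start (p :: ps)
        = [0, 0] ++ (List.range ps.length).map (fun j => pvP (p :: ps.take (j + 1))) := by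
      simp only [solve_from_start, PySem.List.pyGet?]
      norm_num [PySem.List.pyIdx?]
      have hc := A_char ps p ([]) ([0, 0])
      have e1 : pvMinA p ([] : List Int) = p := rfl
      have e2 : pvP [p] = 0 := by simp [pvP, pvMaxA, List.foldl]
      rw [e1, e2] at hc
      rw [hc]
      simp
    -- B side
    have hB : solve_from_start_alt (p :: ps)
        = [0, 0] ++ (List.range ps.length).map (fun j => pvP (p :: ps.take (j + 1))) := by
      unfold solve_from_start_alt
      rw [PySem.List.pyRange_one]
      have hlen : ((((p :: ps).length : Int) + 1) - 0).toNat = ps.length + 1 + 1 := by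
        simp only [List.length_cons]
        omega
      rw [hlen]
      simp only [List.map_map, Function.comp_def, zero_add,
        PySem.List.slice_to_natCast, best_profit_eq]
      simp only [List.range_succ_eq_map, List.map_cons, List.map_map, Function.comp_def]
      simp [pvP, pvMaxA, List.foldl, List.take_succ_cons]
    rw [hA, hB]
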